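-- pv_equiv track=rewrite | github.com/Ag3497120/verantyx-v6 | arc/world_commands.py | fill_each_obj_bbox
-- ===== SOURCE A (Python) =====
-- from collections import Counter, defaultdict
--
-- def _bg(g):
--     c = Counter()
--     for row in g: c.update(row)
--     return c.most_common(1)[0][0]
--
-- def _copy(g):
--     return [row[:] for row in g]
--
-- def _objects(g, bg, conn=4):
--     h, w = len(g), len(g[0])
--     vis = [[False]*w for _ in range(h)]
--     objs = []
--     ds = [(-1,0),(1,0),(0,-1),(0,1)]
--     if conn == 8: ds += [(-1,-1),(-1,1),(1,-1),(1,1)]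
--     for r in range(h):
--         for c in range(w):
--             if not vis[r][c] and g[r][c] != bg:
--                 obj = []; stk = [(r,c)]; vis[r][c] = True
--                 while stk:
--                     cr, cc = stk.pop()
--                     obj.append((cr,cc,g[cr][cc]))
--                     for dr,dc in ds:
--                         nr,nc = cr+dr, cc+dc
--                         if 0<=nr<h and 0<=nc<w and not vis[nr][nc] and g[nr][nc] != bg:
--                             vis[nr][nc] = True; stk.append((nr,nc))
--                 objs.append(obj)
--     return objs
--
-- def _bbox(cells):
--     rs = [r for r,c,_ in cells]; cs = [c for r,c,_ in cells]
--     return min(rs), min(cs), max(rs), max(cs)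
--
-- def _obj_color(obj):
--     return Counter(v for _,_,v in obj).most_common(1)[0][0]
--
-- def fill_each_obj_bbox(g):
--     bg = _bg(g); objs = _objects(g, bg); res = _copy(g)
--     for obj in objs:
--         r0,c0,r1,c1 = _bbox(obj)
--         col = _obj_color(obj)
--         for r in range(r0,r1+1):
--             for c in range(c0,c1+1): res[r][c]=col
--     return res
-- ===== SOURCE B (Python) =====
-- def fill_each_obj_bbox(g):
--     h, w = len(g), len(g[0])
--     counts = {}
--     for row in g:
--         for v in row:
--             counts[v] = counts.get(v, 0) + 1
--     bg = max(counts, key=counts.get)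
--
--     # one scan: flood-fill each object, recording only its bounding box and
--     # majority colour (counts taken in pop order) as a painting plan
--     seen = set()
--     plan = []  # (r0, c0, r1, c1, colour) in discovery order
--     for r in range(h):
--         for c in range(w):
--             if (r, c) not in seen and g[r][c] != bg:
--                 r0 = r1 = r
--                 c0 = c1 = c
--                 cnt = {}
--                 stk = [(r, c)]
--                 seen.add((r, c))
--                 while stk:
--                     cr, cc = stk.pop()
--                     v = g[cr][cc]
--                     cnt[v] = cnt.get(v, 0) + 1
--                     r0 = min(r0, cr); r1 = max(r1, cr)
--                     c0 = min(c0, cc); c1 = max(c1, cc)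
--                     for dr, dc in ((-1, 0), (1, 0), (0, -1), (0, 1)):
--                         nr, nc = cr + dr, cc + dc
--                         if 0 <= nr < h and 0 <= nc < w and (nr, nc) not in seen and g[nr][nc] != bg:
--                             seen.add((nr, nc))
--                             stk.append((nr, nc))
--                 plan.append((r0, c0, r1, c1, max(cnt, key=cnt.get)))
--
--     # render the output functionally: each cell takes the colour of the LAST
--     # plan box covering it (later objects overwrite earlier ones), else its
--     # original value; no grid copy, no in-place mutation
--     def pick(r, c, v):
--         for r0, c0, r1, c1, col in reversed(plan):
--             if r0 <= r <= r1 and c0 <= c <= c1: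
--                 return col
--         return v
--
--     return [[pick(r, c, v) for c, v in enumerate(row)] for r, row in enumerate(g)]
-- ===== Notes on version B (the rewrite author's own statement) =====
-- stated objective: alternative
-- what changed: B replaces A's per-object pipeline (collect cell list, _bbox scan, _obj_color Counter, then mutate a copied grid with nested paint loops) by a plan-and-render scheme: one fused flood-fill scan records only (bbox, majority colour) plan entries per object, and the output grid is then built functionally, each cell taking the colour of the last plan box covering it via reverse lookup, with no grid copy or mutation.
import Mathlib
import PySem

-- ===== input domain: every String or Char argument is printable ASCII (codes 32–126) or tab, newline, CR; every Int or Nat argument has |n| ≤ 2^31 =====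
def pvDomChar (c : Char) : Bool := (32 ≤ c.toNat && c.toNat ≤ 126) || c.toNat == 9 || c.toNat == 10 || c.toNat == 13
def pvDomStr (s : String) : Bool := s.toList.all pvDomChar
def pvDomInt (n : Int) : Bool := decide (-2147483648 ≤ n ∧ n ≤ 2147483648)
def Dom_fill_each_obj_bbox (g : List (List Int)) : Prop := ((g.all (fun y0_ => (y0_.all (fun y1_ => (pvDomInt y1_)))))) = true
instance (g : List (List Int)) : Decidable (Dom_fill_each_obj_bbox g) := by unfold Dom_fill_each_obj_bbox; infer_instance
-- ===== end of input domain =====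

-- B replaces A's per-object pipeline (collect cells, _bbox, _obj_color, paint a mutated copy) by
-- plan-and-render: one fused flood-fill scan records (bbox, majority colour) plan entries, and the
-- output grid is built functionally, each cell taking the colour of the LAST plan box covering it.

-- ===== PORT A =====
-- shared low-level helpers (identical expressions in both Pythons)
-- g[r][c]; only evaluated under in-range guards (Pre_ fixes the grid shape), so the defaults are unreachable
def pvCell (g : List (List Int)) (r c : Int) : Int :=
  PySem.List.pyGetD (PySem.List.pyGetD g r []) c 0

def pvDs : List (Int × Int) := [(-1, 0), (1, 0), (0, -1), (0, 1)]

-- first (key, count) with maximal count, in insertion order: this is both Counter.most_common(1)[0][0]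
-- and Python's max(d, key=d.get) (first maximal key); 0 only for an empty dict (IndexError/ValueError
-- in the Pythons, excluded by Pre_)
def pvFirstMax (items : List (Int × Int)) : Int :=
  (items.foldl (fun best p =>
    match best with
    | none => some p
    | some b => if p.2 > b.2 then some p else some b) none).elim 0 (·.1)

-- the identical neighbour loop of both Pythons: for (dr,dc) in ds: … mark visited and push
def pvStepNbrs (g : List (List Int)) (bg h w cr cc : Int)
    (st : PySem.Set (Int × Int) × List (Int × Int)) : PySem.Set (Int × Int) × List (Int × Int) :=
  pvDs.foldl (fun st d =>
    let nr := cr + d.1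
    let nc := cc + d.2
    if 0 ≤ nr ∧ nr < h ∧ 0 ≤ nc ∧ nc < w ∧ ¬ st.1.contains (nr, nc) ∧ pvCell g nr nc ≠ bg then
      (st.1.add (nr, nc), (nr, nc) :: st.2)
    else st) st

-- res[r][c0..c1] = col / nested paint loops of A
def pvPaintRow (row : List Int) (c0 c1 col : Int) : List Int :=
  (PySem.List.pyRange c0 (c1 + 1) 1).foldl (fun row c => PySem.List.pySetD row c col) row

def pvPaint (res : List (List Int)) (r0 c0 r1 c1 col : Int) : List (List Int) :=
  (PySem.List.pyRange r0 (r1 + 1) 1).foldl (fun res r =>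
    PySem.List.pySetD res r (pvPaintRow (PySem.List.pyGetD res r []) c0 c1 col)) res

-- _bg: Counter updated row by row, then most_common(1)[0][0]
def pvBgA (g : List (List Int)) : Int :=
  pvFirstMax (g.foldl (fun d row =>
    row.foldl (fun (d : PySem.Dict Int Int) v => d.modify v 0 (· + 1)) d) PySem.Dict.empty).items

-- the while-stk loop of _objects, collecting obj in pop order; fuel 2*h*w+1 bounds the loop's
-- decreasing measure 2*#unvisited + |stk|, so it never runs out on the actual call
def pvDfsA (g : List (List Int)) (bg h w : Int) :
    Nat → List (Int × Int) → PySem.Set (Int × Int) → List (Int × Int × Int) →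
    List (Int × Int × Int) × PySem.Set (Int × Int)
  | 0, _, vis, obj => (obj, vis)
  | _ + 1, [], vis, obj => (obj, vis)
  | fuel + 1, (cr, cc) :: stk, vis, obj =>
    let st := pvStepNbrs g bg h w cr cc (vis, stk)
    pvDfsA g bg h w fuel st.2 st.1 (obj ++ [(cr, cc, pvCell g cr cc)])

-- body of the c-loop of _objects
def pvColA (g : List (List Int)) (bg h w r : Int)
    (st : PySem.Set (Int × Int) × List (List (Int × Int × Int))) (c : Int) :
    PySem.Set (Int × Int) × List (List (Int × Int × Int)) :=
  if ¬ st.1.contains (r, c) ∧ pvCell g r c ≠ bg then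
    let d := pvDfsA g bg h w (2 * (h * w).toNat + 1) [(r, c)] (st.1.add (r, c)) []
    (d.2, st.2 ++ [d.1])
  else st

def pvScanA (g : List (List Int)) (bg h w : Int) :
    PySem.Set (Int × Int) × List (List (Int × Int × Int)) :=
  (PySem.List.pyRange 0 h 1).foldl (fun st r =>
    (PySem.List.pyRange 0 w 1).foldl (pvColA g bg h w r) st) ([], [])

-- body of A's final loop: _bbox, _obj_color, paint the box
def pvPaintObj (res : List (List Int)) (obj : List (Int × Int × Int)) : List (List Int) :=
  let r0 := (PySem.List.min? (obj.map (·.1)) (fun x => x)).elim 0 (fun x => x)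
  let c0 := (PySem.List.min? (obj.map (·.2.1)) (fun x => x)).elim 0 (fun x => x)
  let r1 := (PySem.List.max? (obj.map (·.1)) (fun x => x)).elim 0 (fun x => x)
  let c1 := (PySem.List.max? (obj.map (·.2.1)) (fun x => x)).elim 0 (fun x => x)
  let col := pvFirstMax (PySem.Dict.counter (obj.map (·.2.2))).items
  pvPaint res r0 c0 r1 c1 col

def fill_each_obj_bbox (g : List (List Int)) : List (List Int) :=
  let bg := pvBgA g
  let h : Int := g.length
  let w : Int := (PySem.List.pyGetD g 0 []).length
  ((pvScanA g bg h w).2).foldl pvPaintObj g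

-- ===== PORT B =====
-- the plan-entry cover test: r0 ≤ r ≤ r1 and c0 ≤ c ≤ c1 for a plan entry (r0,c0,r1,c1,col)
def pvCover (p : Int × Int × Int × Int × Int) (r c : Int) : Bool :=
  decide (p.1 ≤ r ∧ r ≤ p.2.2.1 ∧ p.2.1 ≤ c ∧ c ≤ p.2.2.2.1)

-- the fused while-stk loop: running bbox (min/max) and count dict updated at each pop
def pvDfsB (g : List (List Int)) (bg h w : Int) :
    Nat → List (Int × Int) → PySem.Set (Int × Int) →
    Int × Int × Int × Int → PySem.Dict Int Int →
    (Int × Int × Int × Int) × PySem.Dict Int Int × PySem.Set (Int × Int)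
  | 0, _, vis, box, cnt => (box, cnt, vis)
  | _ + 1, [], vis, box, cnt => (box, cnt, vis)
  | fuel + 1, (cr, cc) :: stk, vis, box, cnt =>
    let v := pvCell g cr cc
    let st := pvStepNbrs g bg h w cr cc (vis, stk)
    pvDfsB g bg h w fuel st.2 st.1
      (min box.1 cr, min box.2.1 cc, max box.2.2.1 cr, max box.2.2.2 cc)
      (cnt.insert v (cnt.getD v 0 + 1))

-- body of B's c-loop: flood-fill, append the object's (bbox, colour) plan entry
def pvColB (g : List (List Int)) (bg h w r : Int)
    (st : PySem.Set (Int × Int) × List (Int × Int × Int × Int × Int)) (c : Int) :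
    PySem.Set (Int × Int) × List (Int × Int × Int × Int × Int) :=
  if ¬ st.1.contains (r, c) ∧ pvCell g r c ≠ bg then
    let d := pvDfsB g bg h w (2 * (h * w).toNat + 1) [(r, c)] (st.1.add (r, c))
      (r, c, r, c) PySem.Dict.empty
    (d.2.2, st.2 ++ [(d.1.1, d.1.2.1, d.1.2.2.1, d.1.2.2.2, pvFirstMax d.2.1.items)])
  else st

def fill_each_obj_bbox_alt (g : List (List Int)) : List (List Int) :=
  let bg := pvFirstMax (g.foldl (fun d row =>
    row.foldl (fun (d : PySem.Dict Int Int) v => d.insert v (d.getD v 0 + 1)) d)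
    PySem.Dict.empty).items
  let h : Int := g.length
  let w : Int := (PySem.List.pyGetD g 0 []).length
  let plan := ((PySem.List.pyRange 0 h 1).foldl (fun st r =>
    (PySem.List.pyRange 0 w 1).foldl (pvColB g bg h w r) st) ([], [])).2
  (PySem.List.enumerate g 0).map (fun rrow =>
    (PySem.List.enumerate rrow.2 0).map (fun cv =>
      (plan.reverse.find? (fun p => pvCover p rrow.1 cv.1)).elim cv.2 (·.2.2.2.2)))

-- ===== PRECONDITION & SPEC =====
-- Pre_ excludes exactly the inputs where A raises IndexError: a grid with no cell at all
-- (Counter.most_common(1)[0] on an empty counter, or len(g[0]) on an empty grid) and a grid with a row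
-- shorter than row 0 (g[r][c] for c < len(g[0]) out of that row's range).
def Pre_fill_each_obj_bbox (g : List (List Int)) : Prop :=
  (∃ row ∈ g, row ≠ []) ∧ ∀ row ∈ g, (g.headD []).length ≤ row.length
instance (g : List (List Int)) : Decidable (Pre_fill_each_obj_bbox g) := by
  unfold Pre_fill_each_obj_bbox; infer_instance

def pvWitness_fill_each_obj_bbox : List (List Int) := [[0, 1], [0, 0]]

def Spec_fill_each_obj_bbox (g : List (List Int)) (out : List (List Int)) : Prop :=
  out = fill_each_obj_bbox_alt g
instance (g : List (List Int)) (out : List (List Int)) : Decidable (Spec_fill_each_obj_bbox g out) := by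
  unfold Spec_fill_each_obj_bbox; infer_instance

-- ===== CLAIM (what is proved, stated in full; the proofs are below) =====
def Claim_equal_fill_each_obj_bbox : Prop :=
  ∀ (g : List (List Int)), Dom_fill_each_obj_bbox g → Pre_fill_each_obj_bbox g →
    Spec_fill_each_obj_bbox g (fill_each_obj_bbox g)

-- ===== LEMMAS AND PROOFS =====

-- the plan entry A's pvPaintObj computes from an object's cell list
def planOf (obj : List (Int × Int × Int)) : Int × Int × Int × Int × Int :=
  ((PySem.List.min? (obj.map (·.1)) (fun x => x)).elim 0 (fun x => x),
   (PySem.List.min? (obj.map (·.2.1)) (fun x => x)).elim 0 (fun x => x),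
   (PySem.List.max? (obj.map (·.1)) (fun x => x)).elim 0 (fun x => x),
   (PySem.List.max? (obj.map (·.2.1)) (fun x => x)).elim 0 (fun x => x),
   pvFirstMax (PySem.Dict.counter (obj.map (·.2.2))).items)

def paintP (res : List (List Int)) (p : Int × Int × Int × Int × Int) : List (List Int) :=
  pvPaint res p.1 p.2.1 p.2.2.1 p.2.2.2.1 p.2.2.2.2

def pvPick (ps : List (Int × Int × Int × Int × Int)) (r c v : Int) : Int :=
  (ps.reverse.find? (fun p => pvCover p r c)).elim v (·.2.2.2.2)

def renderG (g : List (List Int)) (ps : List (Int × Int × Int × Int × Int)) : List (List Int) :=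
  (PySem.List.enumerate g 0).map (fun rrow =>
    (PySem.List.enumerate rrow.2 0).map (fun cv => pvPick ps rrow.1 cv.1 cv.2))

def pvBoxAcc (box : Int × Int × Int × Int) (obj : List (Int × Int × Int)) : Int × Int × Int × Int :=
  obj.foldl (fun b e => (min b.1 e.1, min b.2.1 e.2.1, max b.2.2.1 e.1, max b.2.2.2 e.2.1)) box

def pvCntAcc (cnt : PySem.Dict Int Int) (obj : List (Int × Int × Int)) : PySem.Dict Int Int :=
  obj.foldl (fun d e => d.insert e.2.2 (d.getD e.2.2 0 + 1)) cnt

def GoodPos (h w : Int) (q : Int × Int) : Prop :=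
  0 ≤ q.1 ∧ q.1 < h ∧ 0 ≤ q.2 ∧ q.2 < w

def GoodObj (h w : Int) (o : List (Int × Int × Int)) : Prop :=
  o ≠ [] ∧ ∀ e ∈ o, GoodPos h w (e.1, e.2.1)

def ValidP (h w : Int) (p : Int × Int × Int × Int × Int) : Prop :=
  0 ≤ p.1 ∧ p.2.2.1 < h ∧ 0 ≤ p.2.1 ∧ p.2.2.2.1 < w

theorem pvDfsA_append (g : List (List Int)) (bg h w : Int) :
    ∀ (fuel : Nat) (stk : List (Int × Int)) (vis : PySem.Set (Int × Int))
      (obj : List (Int × Int × Int)),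
      pvDfsA g bg h w fuel stk vis obj =
        (obj ++ (pvDfsA g bg h w fuel stk vis []).1, (pvDfsA g bg h w fuel stk vis []).2) := by
  intro fuel
  induction fuel with
  | zero => intro stk vis obj; simp [pvDfsA]
  | succ n ih =>
    intro stk vis obj
    cases stk with
    | nil => simp [pvDfsA]
    | cons p t =>
      obtain ⟨cr, cc⟩ := p
      simp only [pvDfsA, List.nil_append]
      rw [ih, ih _ _ [(cr, cc, pvCell g cr cc)]]
      simp

theorem pvDfsB_eq (g : List (List Int)) (bg h w : Int) :
    ∀ (fuel : Nat) (stk : List (Int × Int)) (vis : PySem.Set (Int × Int))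
      (box : Int × Int × Int × Int) (cnt : PySem.Dict Int Int),
      pvDfsB g bg h w fuel stk vis box cnt =
        (pvBoxAcc box (pvDfsA g bg h w fuel stk vis []).1,
         pvCntAcc cnt (pvDfsA g bg h w fuel stk vis []).1,
         (pvDfsA g bg h w fuel stk vis []).2) := by
  intro fuel
  induction fuel with
  | zero => intro stk vis box cnt; simp [pvDfsA, pvDfsB, pvBoxAcc, pvCntAcc]
  | succ n ih =>
    intro stk vis box cnt
    cases stk with
    | nil => simp [pvDfsA, pvDfsB, pvBoxAcc, pvCntAcc]
    | cons p t =>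
      obtain ⟨cr, cc⟩ := p
      simp only [pvDfsA, pvDfsB, List.nil_append]
      rw [ih, pvDfsA_append g bg h w n _ _ [(cr, cc, pvCell g cr cc)]]
      simp [pvBoxAcc, pvCntAcc]

theorem pvBoxAcc_eq (obj : List (Int × Int × Int)) :
    ∀ (box : Int × Int × Int × Int),
      pvBoxAcc box obj =
        (obj.foldl (fun a e => min a e.1) box.1,
         obj.foldl (fun a e => min a e.2.1) box.2.1,
         obj.foldl (fun a e => max a e.1) box.2.2.1,
         obj.foldl (fun a e => max a e.2.1) box.2.2.2) := by
  induction obj with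
  | nil => intro box; simp [pvBoxAcc]
  | cons e t ih => intro box; simp only [pvBoxAcc, List.foldl_cons] at *; rw [ih]

theorem pvCntAcc_counter (obj : List (Int × Int × Int)) :
    PySem.Dict.counter (obj.map (·.2.2)) = pvCntAcc PySem.Dict.empty obj := by
  simp only [PySem.Dict.counter, List.foldl_map, pvCntAcc, PySem.Dict.modify]

-- one step of the DFS from a seed, exposing the popped head
theorem pvDfsA_seed (g : List (List Int)) (bg h w : Int) (n : Nat) (r c : Int)
    (vis : PySem.Set (Int × Int)) :
    pvDfsA g bg h w (n + 1) [(r, c)] vis [] =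
      ((r, c, pvCell g r c) ::
        (pvDfsA g bg h w n (pvStepNbrs g bg h w r c (vis, [])).2
          (pvStepNbrs g bg h w r c (vis, [])).1 []).1,
       (pvDfsA g bg h w n (pvStepNbrs g bg h w r c (vis, [])).2
          (pvStepNbrs g bg h w r c (vis, [])).1 []).2) := by
  simp only [pvDfsA, List.nil_append]
  rw [pvDfsA_append]
  simp

theorem pvColB_eq_plan (g : List (List Int)) (bg h w r c : Int)
    (vis : PySem.Set (Int × Int)) :
    (pvDfsB g bg h w (2 * (h * w).toNat + 1) [(r, c)] (vis.add (r, c)) (r, c, r, c) PySem.Dict.empty).2.2 =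
      (pvDfsA g bg h w (2 * (h * w).toNat + 1) [(r, c)] (vis.add (r, c)) []).2 ∧
    (let d := pvDfsB g bg h w (2 * (h * w).toNat + 1) [(r, c)] (vis.add (r, c)) (r, c, r, c) PySem.Dict.empty
     ((d.1.1, d.1.2.1, d.1.2.2.1, d.1.2.2.2, pvFirstMax d.2.1.items) : Int × Int × Int × Int × Int)) =
      planOf (pvDfsA g bg h w (2 * (h * w).toNat + 1) [(r, c)] (vis.add (r, c)) []).1 := by
  rw [pvDfsB_eq]
  rw [pvDfsA_seed]
  refine ⟨rfl, ?_⟩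
  simp only [planOf, pvBoxAcc_eq, pvCntAcc_counter]
  simp only [List.map_cons, PySem.List.min?_id_cons, PySem.List.max?_id_cons,
    List.foldl_map, List.foldl_cons, Option.elim_some, min_self, max_self]

theorem pvColA_pos (g : List (List Int)) (bg h w r c : Int) (vis : PySem.Set (Int × Int))
    (objs : List (List (Int × Int × Int)))
    (hc : ¬ vis.contains (r, c) = true ∧ pvCell g r c ≠ bg) :
    pvColA g bg h w r (vis, objs) c =
      ((pvDfsA g bg h w (2 * (h * w).toNat + 1) [(r, c)] (vis.add (r, c)) []).2,
       objs ++ [(pvDfsA g bg h w (2 * (h * w).toNat + 1) [(r, c)] (vis.add (r, c)) []).1]) := by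
  unfold pvColA
  rw [if_pos hc]

theorem pvColA_neg (g : List (List Int)) (bg h w r c : Int) (vis : PySem.Set (Int × Int))
    (objs : List (List (Int × Int × Int)))
    (hc : ¬ (¬ vis.contains (r, c) = true ∧ pvCell g r c ≠ bg)) :
    pvColA g bg h w r (vis, objs) c = (vis, objs) := by
  unfold pvColA
  rw [if_neg hc]

theorem pvColB_pos (g : List (List Int)) (bg h w r c : Int) (vis : PySem.Set (Int × Int))
    (plan : List (Int × Int × Int × Int × Int))
    (hc : ¬ vis.contains (r, c) = true ∧ pvCell g r c ≠ bg) :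
    pvColB g bg h w r (vis, plan) c =
      ((pvDfsA g bg h w (2 * (h * w).toNat + 1) [(r, c)] (vis.add (r, c)) []).2,
       plan ++ [planOf (pvDfsA g bg h w (2 * (h * w).toNat + 1) [(r, c)] (vis.add (r, c)) []).1]) := by
  unfold pvColB
  rw [if_pos hc]
  obtain ⟨h1, h2⟩ := pvColB_eq_plan g bg h w r c vis
  simp only [Prod.mk.injEq]
  exact ⟨h1, by rw [← h2]⟩

theorem pvColB_neg (g : List (List Int)) (bg h w r c : Int) (vis : PySem.Set (Int × Int))
    (plan : List (Int × Int × Int × Int × Int))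
    (hc : ¬ (¬ vis.contains (r, c) = true ∧ pvCell g r c ≠ bg)) :
    pvColB g bg h w r (vis, plan) c = (vis, plan) := by
  unfold pvColB
  rw [if_neg hc]

theorem pvColA_append (g : List (List Int)) (bg h w r : Int) :
    ∀ (cs : List Int) (vis : PySem.Set (Int × Int)) (objs : List (List (Int × Int × Int))),
      cs.foldl (pvColA g bg h w r) (vis, objs) =
        ((cs.foldl (pvColA g bg h w r) (vis, [])).1,
         objs ++ (cs.foldl (pvColA g bg h w r) (vis, [])).2) := by
  intro cs
  induction cs with
  | nil => intro vis objs; simp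
  | cons c t ih =>
    intro vis objs
    simp only [List.foldl_cons]
    by_cases hc : ¬ vis.contains (r, c) = true ∧ pvCell g r c ≠ bg
    · rw [pvColA_pos g bg h w r c vis objs hc, pvColA_pos g bg h w r c vis [] hc,
        ih, ih _ ([] ++ [(pvDfsA g bg h w (2 * (h * w).toNat + 1) [(r, c)] (vis.add (r, c)) []).1])]
      simp
    · rw [pvColA_neg g bg h w r c vis objs hc, pvColA_neg g bg h w r c vis [] hc]
      exact ih vis objs

theorem pvScan_cols (g : List (List Int)) (bg h w r : Int) :
    ∀ (cs : List Int) (vis : PySem.Set (Int × Int)) (plan : List (Int × Int × Int × Int × Int)),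
      cs.foldl (pvColB g bg h w r) (vis, plan) =
        ((cs.foldl (pvColA g bg h w r) (vis, [])).1,
         plan ++ ((cs.foldl (pvColA g bg h w r) (vis, [])).2).map planOf) := by
  intro cs
  induction cs with
  | nil => intro vis plan; simp
  | cons c t ih =>
    intro vis plan
    simp only [List.foldl_cons]
    by_cases hc : ¬ vis.contains (r, c) = true ∧ pvCell g r c ≠ bg
    · rw [pvColB_pos g bg h w r c vis plan hc, pvColA_pos g bg h w r c vis [] hc, ih,
        pvColA_append g bg h w r t _ ([] ++ [(pvDfsA g bg h w (2 * (h * w).toNat + 1) [(r, c)] (vis.add (r, c)) []).1])]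
      simp
    · rw [pvColB_neg g bg h w r c vis plan hc, pvColA_neg g bg h w r c vis [] hc]
      exact ih vis plan

theorem pvRowA_append (g : List (List Int)) (bg h w : Int) :
    ∀ (rs : List Int) (vis : PySem.Set (Int × Int)) (objs : List (List (Int × Int × Int))),
      rs.foldl (fun st r => (PySem.List.pyRange 0 w 1).foldl (pvColA g bg h w r) st) (vis, objs) =
        ((rs.foldl (fun st r => (PySem.List.pyRange 0 w 1).foldl (pvColA g bg h w r) st) (vis, [])).1,
         objs ++ (rs.foldl (fun st r => (PySem.List.pyRange 0 w 1).foldl (pvColA g bg h w r) st) (vis, [])).2) := by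
  intro rs
  induction rs with
  | nil => intro vis objs; simp
  | cons r t ih =>
    intro vis objs
    simp only [List.foldl_cons]
    rw [pvColA_append g bg h w r (PySem.List.pyRange 0 w 1) vis objs, ih,
      ih _ ((PySem.List.pyRange 0 w 1).foldl (pvColA g bg h w r) (vis, [])).2]
    simp

theorem pvScan_rows (g : List (List Int)) (bg h w : Int) :
    ∀ (rs : List Int) (vis : PySem.Set (Int × Int)) (plan : List (Int × Int × Int × Int × Int)),
      rs.foldl (fun st r => (PySem.List.pyRange 0 w 1).foldl (pvColB g bg h w r) st) (vis, plan) =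
        ((rs.foldl (fun st r => (PySem.List.pyRange 0 w 1).foldl (pvColA g bg h w r) st) (vis, [])).1,
         plan ++ ((rs.foldl (fun st r => (PySem.List.pyRange 0 w 1).foldl (pvColA g bg h w r) st) (vis, [])).2).map
           planOf) := by
  intro rs
  induction rs with
  | nil => intro vis plan; simp
  | cons r t ih =>
    intro vis plan
    simp only [List.foldl_cons]
    rw [pvScan_cols g bg h w r (PySem.List.pyRange 0 w 1) vis plan, ih,
      pvRowA_append g bg h w t _ ((PySem.List.pyRange 0 w 1).foldl (pvColA g bg h w r) (vis, [])).2]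
    simp

-- ---- goodness of the objects the scan produces ----

theorem foldNbrs_good (g : List (List Int)) (bg h w cr cc : Int) :
    ∀ (ds : List (Int × Int)) (st : PySem.Set (Int × Int) × List (Int × Int)),
      (∀ q ∈ st.2, GoodPos h w q) →
      ∀ q ∈ (ds.foldl (fun st d =>
        let nr := cr + d.1
        let nc := cc + d.2
        if 0 ≤ nr ∧ nr < h ∧ 0 ≤ nc ∧ nc < w ∧ ¬ st.1.contains (nr, nc) ∧ pvCell g nr nc ≠ bg then
          (st.1.add (nr, nc), (nr, nc) :: st.2)
        else st) st).2, GoodPos h w q := by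
  intro ds
  induction ds with
  | nil => intro st hst; exact hst
  | cons d t ih =>
    intro st hst
    simp only [List.foldl_cons]
    apply ih
    by_cases hC : 0 ≤ cr + d.1 ∧ cr + d.1 < h ∧ 0 ≤ cc + d.2 ∧ cc + d.2 < w ∧
        ¬ st.1.contains (cr + d.1, cc + d.2) = true ∧ pvCell g (cr + d.1) (cc + d.2) ≠ bg
    · simp only [if_pos hC]
      intro q hq
      rcases List.mem_cons.mp hq with h1 | h1
      · subst h1; exact ⟨hC.1, hC.2.1, hC.2.2.1, hC.2.2.2.1⟩
      · exact hst q h1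
    · simp only [if_neg hC]
      exact hst

theorem pvStepNbrs_good (g : List (List Int)) (bg h w cr cc : Int)
    (st : PySem.Set (Int × Int) × List (Int × Int))
    (hst : ∀ q ∈ st.2, GoodPos h w q) :
    ∀ q ∈ (pvStepNbrs g bg h w cr cc st).2, GoodPos h w q := by
  unfold pvStepNbrs
  exact foldNbrs_good g bg h w cr cc pvDs st hst

theorem pvDfsA_good (g : List (List Int)) (bg h w : Int) :
    ∀ (fuel : Nat) (stk : List (Int × Int)) (vis : PySem.Set (Int × Int)),
      (∀ q ∈ stk, GoodPos h w q) →
      ∀ e ∈ (pvDfsA g bg h w fuel stk vis []).1, GoodPos h w (e.1, e.2.1) := by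
  intro fuel
  induction fuel with
  | zero => intro stk vis _ e he; simp [pvDfsA] at he
  | succ n ih =>
    intro stk vis hstk e he
    cases stk with
    | nil => simp [pvDfsA] at he
    | cons p t =>
      obtain ⟨cr, cc⟩ := p
      simp only [pvDfsA, List.nil_append] at he
      rw [pvDfsA_append] at he
      simp only [List.mem_append, List.mem_cons] at he
      rcases he with he | he
      · rcases he with he | he
        · subst he; exact hstk (cr, cc) List.mem_cons_self
        · simp at he
      · exact ih _ _ (pvStepNbrs_good g bg h w cr cc (vis, t)
          (fun q hq => hstk q (List.mem_cons_of_mem _ hq))) e he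

theorem pvDfsA_seed_good (g : List (List Int)) (bg h w r c : Int)
    (vis : PySem.Set (Int × Int)) (hr : 0 ≤ r ∧ r < h) (hc : 0 ≤ c ∧ c < w) :
    GoodObj h w (pvDfsA g bg h w (2 * (h * w).toNat + 1) [(r, c)] (vis.add (r, c)) []).1 := by
  constructor
  · rw [pvDfsA_seed]; simp
  · intro e he
    refine pvDfsA_good g bg h w _ _ _ ?_ e he
    intro q hq
    simp only [List.mem_singleton] at hq
    subst hq
    exact ⟨hr.1, hr.2, hc.1, hc.2⟩

theorem pvColsA_good (g : List (List Int)) (bg h w r : Int) (hr : 0 ≤ r ∧ r < h) :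
    ∀ (cs : List Int), (∀ c ∈ cs, 0 ≤ c ∧ c < w) →
    ∀ (vis : PySem.Set (Int × Int)) (objs : List (List (Int × Int × Int))),
      (∀ o ∈ objs, GoodObj h w o) →
      ∀ o ∈ (cs.foldl (pvColA g bg h w r) (vis, objs)).2, GoodObj h w o := by
  intro cs
  induction cs with
  | nil => intro _ vis objs hobjs o ho; exact hobjs o ho
  | cons c t ih =>
    intro hcs vis objs hobjs
    simp only [List.foldl_cons]
    by_cases hc : ¬ vis.contains (r, c) = true ∧ pvCell g r c ≠ bg
    · rw [pvColA_pos g bg h w r c vis objs hc]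
      refine ih (fun x hx => hcs x (List.mem_cons_of_mem _ hx)) _ _ ?_
      intro o ho
      rcases List.mem_append.mp ho with h1 | h1
      · exact hobjs o h1
      · simp only [List.mem_singleton] at h1
        subst h1
        exact pvDfsA_seed_good g bg h w r c vis hr (hcs c List.mem_cons_self)
    · rw [pvColA_neg g bg h w r c vis objs hc]
      exact ih (fun x hx => hcs x (List.mem_cons_of_mem _ hx)) _ _ hobjs

theorem pvScanA_good (g : List (List Int)) (bg h w : Int) :
    ∀ o ∈ (pvScanA g bg h w).2, GoodObj h w o := by
  unfold pvScanA
  have main : ∀ (rs : List Int), (∀ r ∈ rs, 0 ≤ r ∧ r < h) →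
      ∀ (vis : PySem.Set (Int × Int)) (objs : List (List (Int × Int × Int))),
        (∀ o ∈ objs, GoodObj h w o) →
        ∀ o ∈ (rs.foldl (fun st r => (PySem.List.pyRange 0 w 1).foldl (pvColA g bg h w r) st)
          (vis, objs)).2, GoodObj h w o := by
    intro rs
    induction rs with
    | nil => intro _ vis objs hobjs o ho; exact hobjs o ho
    | cons r t ih =>
      intro hrs vis objs hobjs
      simp only [List.foldl_cons]
      have h1 : ∀ o ∈ ((PySem.List.pyRange 0 w 1).foldl (pvColA g bg h w r) (vis, objs)).2,
          GoodObj h w o := by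
        refine pvColsA_good g bg h w r (hrs r List.mem_cons_self) _ ?_ vis objs hobjs
        intro x hx
        exact (PySem.List.mem_pyRange_one.mp hx)
      have h2 := pvColA_append g bg h w r (PySem.List.pyRange 0 w 1) vis objs
      rw [h2] at h1 ⊢
      exact ih (fun x hx => hrs x (List.mem_cons_of_mem _ hx)) _ _ h1
  intro o ho
  refine main (PySem.List.pyRange 0 h 1) ?_ [] [] (by simp) o ho
  intro x hx
  exact PySem.List.mem_pyRange_one.mp hx

theorem foldl_min_lb (lo : Int) :
    ∀ (l : List Int) (a : Int), lo ≤ a → (∀ x ∈ l, lo ≤ x) → lo ≤ l.foldl min a := by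
  intro l
  induction l with
  | nil => intro a ha _; simpa using ha
  | cons x t ih =>
    intro a ha hl
    simp only [List.foldl_cons]
    exact ih _ (le_min ha (hl x List.mem_cons_self)) (fun y hy => hl y (List.mem_cons_of_mem _ hy))

theorem foldl_max_ub (hi : Int) :
    ∀ (l : List Int) (a : Int), a < hi → (∀ x ∈ l, x < hi) → l.foldl max a < hi := by
  intro l
  induction l with
  | nil => intro a ha _; simpa using ha
  | cons x t ih =>
    intro a ha hl
    simp only [List.foldl_cons]
    exact ih _ (max_lt ha (hl x List.mem_cons_self)) (fun y hy => hl y (List.mem_cons_of_mem _ hy))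

theorem planOf_valid (h w : Int) (o : List (Int × Int × Int)) (ho : GoodObj h w o) :
    ValidP h w (planOf o) := by
  obtain ⟨hne, hg⟩ := ho
  cases o with
  | nil => exact absurd rfl hne
  | cons e t =>
    simp only [planOf, List.map_cons, PySem.List.min?_id_cons, PySem.List.max?_id_cons,
      Option.elim_some]
    have he := hg e List.mem_cons_self
    refine ⟨?_, ?_, ?_, ?_⟩
    · refine foldl_min_lb 0 _ _ he.1 ?_
      intro x hx
      obtain ⟨e', he', rfl⟩ := List.mem_map.mp hx
      exact (hg e' (List.mem_cons_of_mem _ he')).1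
    · refine foldl_max_ub h _ _ he.2.1 ?_
      intro x hx
      obtain ⟨e', he', rfl⟩ := List.mem_map.mp hx
      exact (hg e' (List.mem_cons_of_mem _ he')).2.1
    · refine foldl_min_lb 0 _ _ he.2.2.1 ?_
      intro x hx
      obtain ⟨e', he', rfl⟩ := List.mem_map.mp hx
      exact (hg e' (List.mem_cons_of_mem _ he')).2.2.1
    · refine foldl_max_ub w _ _ he.2.2.2 ?_
      intro x hx
      obtain ⟨e', he', rfl⟩ := List.mem_map.mp hx
      exact (hg e' (List.mem_cons_of_mem _ he')).2.2.2

-- ---- the render equivalence ----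

theorem pvPick_nil (r c v : Int) : pvPick [] r c v = v := rfl

theorem pvPick_append (qs : List (Int × Int × Int × Int × Int)) (p : Int × Int × Int × Int × Int)
    (r c v : Int) :
    pvPick (qs ++ [p]) r c v = if pvCover p r c then p.2.2.2.2 else pvPick qs r c v := by
  unfold pvPick
  rw [List.reverse_append]
  simp only [List.reverse_cons, List.reverse_nil, List.nil_append, List.cons_append,
    List.find?_cons]
  by_cases hc : pvCover p r c
  · simp [hc]
  · simp [hc]

theorem paintRow_length (col : Int) :
    ∀ (cs : List Int) (row : List Int),
      (cs.foldl (fun row c => PySem.List.pySetD row c col) row).length = row.length := by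
  intro cs
  induction cs with
  | nil => intro row; rfl
  | cons c t ih =>
    intro row
    simp only [List.foldl_cons]
    rw [ih, PySem.List.length_pySetD]

theorem paintRow_get (col b : Int) :
    ∀ (n : Nat) (a : Int) (row : List Int), 0 ≤ a → (b - a).toNat ≤ n →
      b ≤ (row.length : Int) → ∀ (j : Nat),
      ((PySem.List.pyRange a b 1).foldl (fun row c => PySem.List.pySetD row c col) row)[j]? =
        if a ≤ (j : Int) ∧ (j : Int) < b then some col else row[j]? := by
  intro n
  induction n with
  | zero =>
    intro a row ha hn hb j
    have hba : b ≤ a := by omega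
    rw [PySem.List.pyRange_one_eq_nil hba]
    simp only [List.foldl_nil]
    rw [if_neg (by omega)]
  | succ n ih =>
    intro a row ha hn hb j
    by_cases hab : b ≤ a
    · rw [PySem.List.pyRange_one_eq_nil hab]
      simp only [List.foldl_nil]
      rw [if_neg (by omega)]
    · have hab : a < b := by omega
      rw [PySem.List.pyRange_one_cons hab]
      simp only [List.foldl_cons]
      have hlen' : b ≤ ((PySem.List.pySetD row a col).length : Int) := by
        rw [PySem.List.pySetD_of_nonneg _ _ ha, List.length_set]
        exact hb
      have ih' := ih (a + 1) (PySem.List.pySetD row a col) (by omega) (by omega) hlen' j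
      rw [ih', PySem.List.pySetD_of_nonneg _ _ ha, List.getElem?_set]
      by_cases hja : (j : Int) = a
      · rw [if_neg (show ¬(a + 1 ≤ (j : Int) ∧ (j : Int) < b) by omega),
          if_pos (show a.toNat = j by omega),
          if_pos (show a.toNat < row.length by omega),
          if_pos (show a ≤ (j : Int) ∧ (j : Int) < b by omega)]
      · rw [if_neg (show ¬ a.toNat = j by omega)]
        by_cases hcond : a ≤ (j : Int) ∧ (j : Int) < b
        · rw [if_pos (show a + 1 ≤ (j : Int) ∧ (j : Int) < b by omega), if_pos hcond]
        · rw [if_neg (show ¬(a + 1 ≤ (j : Int) ∧ (j : Int) < b) by omega), if_neg hcond]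

theorem pvPaintRow_length (row : List Int) (c0 c1 col : Int) :
    (pvPaintRow row c0 c1 col).length = row.length :=
  paintRow_length col _ row

theorem pvPaintRow_get (row : List Int) (c0 c1 col : Int) (hc0 : 0 ≤ c0)
    (hc1 : c1 < (row.length : Int)) (j : Nat) :
    (pvPaintRow row c0 c1 col)[j]? =
      if c0 ≤ (j : Int) ∧ (j : Int) ≤ c1 then some col else row[j]? := by
  unfold pvPaintRow
  rw [paintRow_get col (c1 + 1) (c1 + 1 - c0).toNat c0 row hc0 le_rfl (by omega)]
  by_cases hc : c0 ≤ (j : Int) ∧ (j : Int) ≤ c1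
  · rw [if_pos (by omega), if_pos hc]
  · rw [if_neg (by omega), if_neg hc]

theorem paint_length (c0 c1 col : Int) :
    ∀ (rs : List Int) (res : List (List Int)),
      (rs.foldl (fun res r =>
        PySem.List.pySetD res r (pvPaintRow (PySem.List.pyGetD res r []) c0 c1 col)) res).length =
        res.length := by
  intro rs
  induction rs with
  | nil => intro res; rfl
  | cons r t ih =>
    intro res
    simp only [List.foldl_cons]
    rw [ih, PySem.List.length_pySetD]

theorem paint_shape (c0 c1 col : Int) :
    ∀ (rs : List Int), (∀ r ∈ rs, 0 ≤ r) → ∀ (res : List (List Int)) (i : Nat),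
      ((rs.foldl (fun res r =>
        PySem.List.pySetD res r (pvPaintRow (PySem.List.pyGetD res r []) c0 c1 col)) res)[i]?).map
          List.length = ((res[i]?).map List.length) := by
  intro rs
  induction rs with
  | nil => intro _ res i; rfl
  | cons r t ih =>
    intro hrs res i
    simp only [List.foldl_cons]
    rw [ih (fun x hx => hrs x (List.mem_cons_of_mem _ hx))]
    have hr : 0 ≤ r := hrs r List.mem_cons_self
    rw [PySem.List.pySetD_of_nonneg _ _ hr]
    rw [List.getElem?_set]
    by_cases hri : r.toNat = i
    · subst hri
      by_cases hlt : r.toNat < res.length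
      · rw [if_pos rfl, if_pos hlt]
        have : res[r.toNat]? = some (res[r.toNat]'hlt) := List.getElem?_eq_getElem hlt
        rw [this]
        simp only [Option.map_some]
        rw [pvPaintRow_length]
        congr 1
        rw [PySem.List.pyGetD_of_nonneg _ _ hr]
        simp [List.getD, this]
      · rw [if_pos rfl, if_neg hlt]
        rw [List.getElem?_eq_none (by omega)]
    · rw [if_neg hri]

theorem paint_get (c0 c1 col b : Int) :
    ∀ (n : Nat) (a : Int) (res : List (List Int)), 0 ≤ a → (b - a).toNat ≤ n →
      b ≤ (res.length : Int) → 0 ≤ c0 →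
      (∀ (k : Nat), (k : Int) < b → c1 < (((res[k]?).getD []).length : Int)) → ∀ (i j : Nat),
      (((PySem.List.pyRange a b 1).foldl (fun res r =>
        PySem.List.pySetD res r (pvPaintRow (PySem.List.pyGetD res r []) c0 c1 col)) res)[i]?.bind
          (fun row => row[j]?)) =
        if a ≤ (i : Int) ∧ (i : Int) < b ∧ c0 ≤ (j : Int) ∧ (j : Int) ≤ c1 then some col
        else ((res[i]?).bind (fun row => row[j]?)) := by
  intro n
  induction n with
  | zero =>
    intro a res ha hn hb hc0 hrow i j
    have hba : b ≤ a := by omega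
    rw [PySem.List.pyRange_one_eq_nil hba]
    simp only [List.foldl_nil]
    rw [if_neg (by omega)]
  | succ n ih =>
    intro a res ha hn hb hc0 hrow i j
    by_cases hab : b ≤ a
    · rw [PySem.List.pyRange_one_eq_nil hab]
      simp only [List.foldl_nil]
      rw [if_neg (by omega)]
    · have hab : a < b := by omega
      rw [PySem.List.pyRange_one_cons hab]
      simp only [List.foldl_cons]
      have hlt : a.toNat < res.length := by omega
      have hres : res[a.toNat]? = some (res[a.toNat]'hlt) := List.getElem?_eq_getElem hlt
      have hget : PySem.List.pyGetD res a [] = res[a.toNat]'hlt := by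
        rw [PySem.List.pyGetD_of_nonneg _ _ ha]
        simp [List.getD, hres]
      have hsets : PySem.List.pySetD res a (pvPaintRow (PySem.List.pyGetD res a []) c0 c1 col) =
          res.set a.toNat (pvPaintRow (PySem.List.pyGetD res a []) c0 c1 col) :=
        PySem.List.pySetD_of_nonneg _ _ ha
      have hlen' : b ≤ (((PySem.List.pySetD res a
          (pvPaintRow (PySem.List.pyGetD res a []) c0 c1 col))).length : Int) := by
        rw [hsets, List.length_set]
        exact hb
      have hrow' : ∀ (k : Nat), (k : Int) < b →
          c1 < ((((PySem.List.pySetD res a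
            (pvPaintRow (PySem.List.pyGetD res a []) c0 c1 col))[k]?).getD []).length : Int) := by
        intro k hk
        rw [hsets, List.getElem?_set]
        by_cases hak : a.toNat = k
        · rw [if_pos hak, if_pos (by omega)]
          simp only [Option.getD_some]
          rw [pvPaintRow_length, hget]
          have hthis := hrow k hk
          rw [← hak, hres] at hthis
          simpa using hthis
        · rw [if_neg hak]
          exact hrow k hk
      have hx1 : (0 : Int) ≤ a + 1 := by omega
      have hx2 : (b - (a + 1)).toNat ≤ n := by omega
      have ih' := ih (a + 1) (PySem.List.pySetD res a
          (pvPaintRow (PySem.List.pyGetD res a []) c0 c1 col)) hx1 hx2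
        hlen' hc0 hrow' i j
      rw [ih', hsets, List.getElem?_set]
      by_cases hia : a.toNat = i
      · rw [if_neg (show ¬(a + 1 ≤ (i : Int) ∧ (i : Int) < b ∧ c0 ≤ (j : Int) ∧
            (j : Int) ≤ c1) by omega)]
        rw [if_pos hia, if_pos (show a.toNat < res.length from hlt)]
        simp only [Option.bind_some]
        have hc1' : c1 < ((res[a.toNat]'hlt).length : Int) := by
          have hthis := hrow i (by omega)
          rw [← hia, hres] at hthis
          simpa using hthis
        rw [pvPaintRow_get _ _ _ _ hc0 (by rw [hget]; exact hc1') j]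
        by_cases hcov : c0 ≤ (j : Int) ∧ (j : Int) ≤ c1
        · rw [if_pos hcov, if_pos (show a ≤ (i : Int) ∧ (i : Int) < b ∧ c0 ≤ (j : Int) ∧
            (j : Int) ≤ c1 from ⟨by omega, by omega, hcov⟩)]
        · rw [if_neg hcov, if_neg (show ¬(a ≤ (i : Int) ∧ (i : Int) < b ∧ c0 ≤ (j : Int) ∧
            (j : Int) ≤ c1) from fun hh => hcov ⟨hh.2.2.1, hh.2.2.2⟩)]
          rw [hget, ← hia, hres]
          simp only [Option.bind_some]
      · rw [if_neg hia]
        by_cases hcond : a + 1 ≤ (i : Int) ∧ (i : Int) < b ∧ c0 ≤ (j : Int) ∧ (j : Int) ≤ c1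
        · rw [if_pos hcond, if_pos (by omega)]
        · rw [if_neg hcond]
          by_cases hcond2 : a ≤ (i : Int) ∧ (i : Int) < b ∧ c0 ≤ (j : Int) ∧ (j : Int) ≤ c1
          · exact absurd ⟨by omega, hcond2.2⟩ hcond
          · rw [if_neg hcond2]

theorem foldPaint_shape (ps : List (Int × Int × Int × Int × Int))
    (hps : ∀ p ∈ ps, 0 ≤ p.1) :
    ∀ (g0 : List (List Int)),
      (ps.foldl paintP g0).length = g0.length ∧
      ∀ i : Nat, ((ps.foldl paintP g0)[i]?).map List.length = ((g0[i]?).map List.length) := by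
  induction ps with
  | nil => intro g0; exact ⟨rfl, fun _ => rfl⟩
  | cons p t ih =>
    intro g0
    simp only [List.foldl_cons]
    obtain ⟨ihl, ihe⟩ := ih (fun q hq => hps q (List.mem_cons_of_mem _ hq)) (paintP g0 p)
    have hp1 : 0 ≤ p.1 := hps p List.mem_cons_self
    have hmem : ∀ r ∈ PySem.List.pyRange p.1 (p.2.2.1 + 1) 1, 0 ≤ r := by
      intro r hr
      have := PySem.List.mem_pyRange_one.mp hr
      omega
    constructor
    · rw [ihl]
      exact paint_length _ _ _ _ g0
    · intro i
      rw [ihe i]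
      exact paint_shape _ _ _ _ hmem g0 i

theorem foldPaint_get (g0 : List (List Int))
    (hgw : ∀ (k : Nat) (hk : k < g0.length), (PySem.List.pyGetD g0 0 []).length ≤ (g0[k]'hk).length) :
    ∀ (ps : List (Int × Int × Int × Int × Int)),
      (∀ p ∈ ps, ValidP (g0.length : Int) ((PySem.List.pyGetD g0 0 []).length : Int) p) →
      ∀ (i j : Nat),
        ((ps.foldl paintP g0)[i]?.bind (fun row => row[j]?)) =
          ((g0[i]?).bind (fun row => row[j]?)).map (fun v => pvPick ps (i : Int) (j : Int) v) := by
  intro ps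
  induction ps using List.reverseRecOn with
  | nil =>
    intro _ i j
    simp only [List.foldl_nil, pvPick_nil]
    cases (g0[i]?).bind (fun row => row[j]?) <;> rfl
  | append_singleton qs p ihq =>
    intro hps i j
    have hq : ∀ q ∈ qs, ValidP (g0.length : Int) ((PySem.List.pyGetD g0 0 []).length : Int) q :=
      fun q hq => hps q (List.mem_append_left _ hq)
    have hp : ValidP (g0.length : Int) ((PySem.List.pyGetD g0 0 []).length : Int) p :=
      hps p (List.mem_append_right _ List.mem_cons_self)
    rw [List.foldl_append]
    simp only [List.foldl_cons, List.foldl_nil]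
    obtain ⟨hlenq, hshapeq⟩ := foldPaint_shape qs (fun q hqq => (hq q hqq).1) g0
    have hmain := paint_get p.2.1 p.2.2.2.1 p.2.2.2.2 (p.2.2.1 + 1)
      (p.2.2.1 + 1 - p.1).toNat p.1 (qs.foldl paintP g0) hp.1 le_rfl
      (by rw [hlenq]; have := hp.2.1; omega) hp.2.2.1
      (by
        intro k hk
        have hklen : k < g0.length := by
          have := hp.2.1
          omega
        have := hshapeq k
        rw [List.getElem?_eq_getElem hklen] at this
        cases hq2 : (qs.foldl paintP g0)[k]? with
        | none => rw [hq2] at this; simp at this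
        | some row =>
          rw [hq2] at this
          simp only [Option.map_some, Option.some.injEq] at this
          simp only [Option.getD_some]
          have hwk := hgw k hklen
          have hcc := hp.2.2.2
          omega) i j
    have hmain' : ((paintP (qs.foldl paintP g0) p)[i]?.bind (fun row => row[j]?)) =
        if p.1 ≤ (i : Int) ∧ (i : Int) < p.2.2.1 + 1 ∧ p.2.1 ≤ (j : Int) ∧ (j : Int) ≤ p.2.2.2.1
        then some p.2.2.2.2
        else (((qs.foldl paintP g0)[i]?).bind (fun row => row[j]?)) := hmain
    rw [hmain', ihq hq i j]
    by_cases hcov : pvCover p (i : Int) (j : Int) = true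
    · have hcond : p.1 ≤ (i : Int) ∧ (i : Int) < p.2.2.1 + 1 ∧ p.2.1 ≤ (j : Int) ∧
          (j : Int) ≤ p.2.2.2.1 := by
        have := of_decide_eq_true hcov
        exact ⟨this.1, by omega, this.2.2.1, this.2.2.2⟩
      rw [if_pos hcond]
      have hilen : i < g0.length := by have := hp.2.1; omega
      have hival : g0[i]? = some (g0[i]'hilen) := List.getElem?_eq_getElem hilen
      have hjlen : j < (g0[i]'hilen).length := by
        have hwk := hgw i hilen
        have := hp.2.2.2
        omega
      rw [hival]
      simp only [Option.bind_some]
      rw [List.getElem?_eq_getElem hjlen]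
      simp only [Option.map_some]
      rw [pvPick_append, if_pos hcov]
    · have hcond : ¬ (p.1 ≤ (i : Int) ∧ (i : Int) < p.2.2.1 + 1 ∧ p.2.1 ≤ (j : Int) ∧
          (j : Int) ≤ p.2.2.2.1) := by
        intro hcc
        exact hcov (decide_eq_true (by exact ⟨hcc.1, by omega, hcc.2.2.1, hcc.2.2.2⟩))
      rw [if_neg hcond]
      cases hentry : (g0[i]?).bind (fun row => row[j]?) with
      | none => rfl
      | some v =>
        simp only [Option.map_some]
        rw [pvPick_append, if_neg hcov]

theorem renderG_get (g0 : List (List Int)) (ps : List (Int × Int × Int × Int × Int)) (i j : Nat) :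
    ((renderG g0 ps)[i]?.bind (fun row => row[j]?)) =
      ((g0[i]?).bind (fun row => row[j]?)).map (fun v => pvPick ps (i : Int) (j : Int) v) := by
  unfold renderG
  rw [List.getElem?_map, PySem.List.getElem?_enumerate]
  cases hgi : g0[i]? with
  | none => rfl
  | some row =>
    simp only [Option.map_some, Option.bind_some]
    rw [List.getElem?_map, PySem.List.getElem?_enumerate]
    cases hrj : row[j]? with
    | none => rfl
    | some v =>
      simp only [Option.map_some]
      norm_num

theorem renderG_length (g0 : List (List Int)) (ps : List (Int × Int × Int × Int × Int)) :
    (renderG g0 ps).length = g0.length := by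
  unfold renderG
  rw [List.length_map, PySem.List.length_enumerate]

theorem renderG_row_length (g0 : List (List Int)) (ps : List (Int × Int × Int × Int × Int))
    (i : Nat) (hi : i < g0.length) :
    ((renderG g0 ps)[i]'(by rw [renderG_length]; exact hi)).length = (g0[i]'hi).length := by
  unfold renderG
  simp [PySem.List.getElem_enumerate, PySem.List.length_enumerate]

theorem foldPaint_eq_render (g0 : List (List Int))
    (hgw : ∀ (k : Nat) (hk : k < g0.length), (PySem.List.pyGetD g0 0 []).length ≤ (g0[k]'hk).length)
    (ps : List (Int × Int × Int × Int × Int))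
    (hps : ∀ p ∈ ps, ValidP (g0.length : Int) ((PySem.List.pyGetD g0 0 []).length : Int) p) :
    ps.foldl paintP g0 = renderG g0 ps := by
  obtain ⟨hlen, hshape⟩ := foldPaint_shape ps (fun p hp => (hps p hp).1) g0
  apply List.ext_getElem (by rw [hlen, renderG_length])
  intro i hi1 hi2
  have hig : i < g0.length := by rw [hlen] at hi1; exact hi1
  apply List.ext_getElem
  · have hs := hshape i
    rw [List.getElem?_eq_getElem hi1, List.getElem?_eq_getElem hig] at hs
    simp only [Option.map_some, Option.some.injEq] at hs
    rw [hs, renderG_row_length g0 ps i hig]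
  · intro j hj1 hj2
    have h1 := foldPaint_get g0 hgw ps hps i j
    have h2 := renderG_get g0 ps i j
    rw [List.getElem?_eq_getElem hi1] at h1
    rw [List.getElem?_eq_getElem hi2] at h2
    simp only [Option.bind_some] at h1 h2
    rw [List.getElem?_eq_getElem hj1] at h1
    rw [List.getElem?_eq_getElem hj2] at h2
    rw [← h2] at h1
    exact Option.some_inj.mp h1

-- ===== VERDICT (by name: the statement is the Claim_ definition above) =====
theorem fill_each_obj_bbox_spec : Claim_equal_fill_each_obj_bbox := by
  intro g _ hpre
  unfold Spec_fill_each_obj_bbox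
  obtain ⟨_, hrows⟩ := hpre
  have h0 : PySem.List.pyGetD g 0 [] = g.headD [] := by
    rw [PySem.List.pyGetD_of_nonneg _ _ (le_refl 0)]
    cases g <;> rfl
  have hgw : ∀ (k : Nat) (hk : k < g.length),
      (PySem.List.pyGetD g 0 []).length ≤ (g[k]'hk).length := by
    intro k hk
    rw [h0]
    exact hrows _ (List.getElem_mem hk)
  have hobjs := pvScanA_good g (pvBgA g) (g.length : Int) ((PySem.List.pyGetD g 0 []).length : Int)
  have hvalid : ∀ p ∈ ((pvScanA g (pvBgA g) (g.length : Int)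
      ((PySem.List.pyGetD g 0 []).length : Int)).2).map planOf,
      ValidP (g.length : Int) ((PySem.List.pyGetD g 0 []).length : Int) p := by
    intro p hp
    obtain ⟨o, ho, rfl⟩ := List.mem_map.mp hp
    exact planOf_valid _ _ o (hobjs o ho)
  have hbgeq : pvFirstMax (g.foldl (fun d row =>
      row.foldl (fun (d : PySem.Dict Int Int) v => d.insert v (d.getD v 0 + 1)) d)
      PySem.Dict.empty).items = pvBgA g := rfl
  have hB : fill_each_obj_bbox_alt g = renderG g (((pvScanA g (pvBgA g) (g.length : Int)
      ((PySem.List.pyGetD g 0 []).length : Int)).2).map planOf) := by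
    simp only [fill_each_obj_bbox_alt, pvScanA, renderG]
    rw [hbgeq, pvScan_rows]
    simp only [List.nil_append]
    rfl
  have hA : fill_each_obj_bbox g = ((pvScanA g (pvBgA g) (g.length : Int)
      ((PySem.List.pyGetD g 0 []).length : Int)).2).foldl pvPaintObj g := rfl
  rw [hA, hB, ← foldPaint_eq_render g hgw _ hvalid]
  rw [List.foldl_map]
  rfl
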